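-- pv_equiv track=rewrite | github.com/lthero-big/163MusicLyricsDownloader | fetch163Lyrics.py | merge_lrc
-- ===== SOURCE A (Python) =====
-- from typing import Dict, List, Optional, Tuple
--
-- def merge_lrc(base_map: Dict[int, str], trans_map: Dict[int, str]) -> List[str]:
--     if not base_map:
--         return []
--     merged_lines = []
--     trans_keys = sorted(trans_map.keys())
--
--     def find_near(ms: int, tol: int = 500) -> Optional[str]:
--         import bisect
--         i = bisect.bisect_left(trans_keys, ms)
--         candidates = []
--         if i < len(trans_keys):
--             candidates.append(trans_keys[i])
--         if i > 0:
--             candidates.append(trans_keys[i-1])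
--         best = None
--         best_d = tol + 1
--         for k in candidates:
--             d = abs(k - ms)
--             if d <= tol and d < best_d:
--                 best, best_d = k, d
--         return trans_map.get(best) if best is not None else None
--
--     for ts in sorted(base_map.keys()):
--         tag = ts_to_tag(ts)
--         base_text = base_map[ts]
--         trans_text = find_near(ts) if trans_map else None
--         if trans_text:
--             merged_lines.append(f"{tag}{base_text} / {trans_text}")
--         else:
--             merged_lines.append(f"{tag}{base_text}")
--     return merged_lines
--
-- def ts_to_tag(ms: int) -> str:
--     mm = ms // 60000
--     ss = (ms % 60000) // 1000
--     xxx = ms % 1000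
--     return f"[{mm:02d}:{ss:02d}.{xxx:03d}]"
-- ===== SOURCE B (Python) =====
-- def ts_to_tag(ms: int) -> str:
--     mm = ms // 60000
--     ss = (ms % 60000) // 1000
--     xxx = ms % 1000
--     return f"[{mm:02d}:{ss:02d}.{xxx:03d}]"
--
-- def merge_lrc(base_map, trans_map):
--     merged_lines = []
--     for ts in sorted(base_map):
--         near = [k for k in trans_map if abs(k - ts) <= 500]
--         trans_text = trans_map[min(near, key=lambda k: (abs(k - ts), -k))] if near else None
--         line = f"{ts_to_tag(ts)}{base_map[ts]}"
--         merged_lines.append(f"{line} / {trans_text}" if trans_text else line)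
--     return merged_lines
-- ===== Notes on version B (the rewrite author's own statement) =====
-- stated objective: simpler
-- what changed: B drops the sorted translation-key list, bisect and the two-candidate best/best_d fold: for each base timestamp it filters the in-tolerance keys directly from the dict and takes min with a (distance, -key) tuple key.
import Mathlib
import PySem

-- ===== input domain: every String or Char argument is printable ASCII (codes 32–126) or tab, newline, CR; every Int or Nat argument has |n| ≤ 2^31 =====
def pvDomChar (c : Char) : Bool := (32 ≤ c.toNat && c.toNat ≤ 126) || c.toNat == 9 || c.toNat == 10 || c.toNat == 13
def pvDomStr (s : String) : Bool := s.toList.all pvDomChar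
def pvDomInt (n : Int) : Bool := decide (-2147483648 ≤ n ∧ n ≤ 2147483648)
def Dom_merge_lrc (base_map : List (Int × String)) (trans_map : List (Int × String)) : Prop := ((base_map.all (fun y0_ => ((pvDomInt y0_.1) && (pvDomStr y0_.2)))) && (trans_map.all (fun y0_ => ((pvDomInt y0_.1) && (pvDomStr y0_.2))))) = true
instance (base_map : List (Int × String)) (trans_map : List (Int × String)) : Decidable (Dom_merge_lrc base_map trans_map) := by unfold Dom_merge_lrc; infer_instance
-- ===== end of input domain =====

-- B replaces A's sorted key list + bisect + two-candidate fold by a direct filter of the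
-- in-tolerance keys and a min with a (distance, -key) tuple key (objective: simpler).

-- ===== PORT A =====
-- module helper ts_to_tag, shared by both Pythons ({mm:02d} zero-padding of a possibly
-- negative int is str(n).zfill(w), i.e. PySem.Str.zfill)
def ts_to_tag (ms : Int) : String :=
  let mm := PySem.Int.floordiv ms 60000
  let ss := PySem.Int.floordiv (PySem.Int.mod ms 60000) 1000
  let xxx := PySem.Int.mod ms 1000
  "[" ++ PySem.Str.zfill (PySem.Int.toStr mm) 2 ++ ":" ++ PySem.Str.zfill (PySem.Int.toStr ss) 2
      ++ "." ++ PySem.Str.zfill (PySem.Int.toStr xxx) 3 ++ "]"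

def merge_lrc (base_map : List (Int × String)) (trans_map : List (Int × String)) : List String :=
  let bd := PySem.Dict.ofList base_map
  let td := PySem.Dict.ofList trans_map
  if bd.items = [] then []
  else
    let trans_keys := PySem.List.sorted td.keys (fun k => k) false
    let find_near : Int → Option String := fun ms =>
      let tol : Int := 500
      let i := PySem.List.bisectLeft trans_keys ms
      -- the two guarded indexings trans_keys[i] / trans_keys[i-1] are in range (getD default unreachable)
      let candidates : List Int :=
        (if i < trans_keys.length then [trans_keys.getD i 0] else []) ++
        (if 0 < i then [trans_keys.getD (i - 1) 0] else [])
      let st := candidates.foldl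
        (fun (st : Option Int × Int) k =>
          let d := |k - ms|
          if d ≤ tol ∧ d < st.2 then (some k, d) else st)
        (none, tol + 1)
      match st.1 with
      | some b => td.get? b
      | none => none
    (PySem.List.sorted bd.keys (fun k => k) false).foldl
      (fun acc ts =>
        let tag := ts_to_tag ts
        let base_text := bd.getD ts ""      -- base_map[ts]: ts is one of the keys, never raises
        let trans_text := if td.items = [] then none else find_near ts
        match trans_text with
        | some t => if t ≠ "" then acc ++ [tag ++ base_text ++ " / " ++ t]
                    else acc ++ [tag ++ base_text]
        | none => acc ++ [tag ++ base_text])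
      []

-- ===== PORT B =====
def merge_lrc_alt (base_map : List (Int × String)) (trans_map : List (Int × String)) : List String :=
  let bd := PySem.Dict.ofList base_map
  let td := PySem.Dict.ofList trans_map
  (PySem.List.sorted bd.keys (fun k => k) false).foldl
    (fun acc ts =>
      let near := td.keys.filter (fun k => |k - ts| ≤ 500)
      let trans_text : Option String :=
        match PySem.List.min2? near (fun k => |k - ts|) (fun k => -k) with
        | some b => td.get? b      -- trans_map[...]: the key comes from trans_map, never raises
        | none => none
      let line := ts_to_tag ts ++ bd.getD ts ""
      acc ++ [match trans_text with
              | some t => if t ≠ "" then line ++ " / " ++ t else line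
              | none => line])
    []

-- ===== PRECONDITION & SPEC =====
def Spec_merge_lrc (base_map : List (Int × String)) (trans_map : List (Int × String)) (out : List String) : Prop := out = merge_lrc_alt base_map trans_map
instance (base_map : List (Int × String)) (trans_map : List (Int × String)) (out : List String) : Decidable (Spec_merge_lrc base_map trans_map out) := by unfold Spec_merge_lrc; infer_instance

-- ===== CLAIM (what is proved, stated in full; the proofs are below) =====
def Claim_equal_merge_lrc : Prop := ∀ (base_map : List (Int × String)) (trans_map : List (Int × String)), Dom_merge_lrc base_map trans_map → Spec_merge_lrc base_map trans_map (merge_lrc base_map trans_map)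

-- ===== LEMMAS AND PROOFS =====

-- the folder of PySem.List.min2? over Int with keys f and (-·)
def pvMinStep (f : Int → Int) (acc : Option Int) (x : Int) : Option Int :=
  match acc with
  | none => some x
  | some m => if (decide (f x < f m) || !decide (f m < f x) && decide ((-x) < (-m))) = true
              then some x else some m

lemma pvMin2?_eq_foldl (xs : List Int) (f : Int → Int) :
    PySem.List.min2? xs f (fun k => -k) = xs.foldl (pvMinStep f) none := by
  unfold PySem.List.min2?
  congr 1
  funext acc x
  cases acc <;> rfl

lemma pvMinStep_some (f : Int → Int) (z y : Int) :
    pvMinStep f (some z) y =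
      if f y < f z ∨ (f y ≤ f z ∧ z < y) then some y else some z := by
  simp only [pvMinStep, Bool.or_eq_true, Bool.and_eq_true, Bool.not_eq_true',
    decide_eq_true_eq, decide_eq_false_iff_not]
  split_ifs
  all_goals first | rfl | (exfalso; omega)

-- invariant of the min2? fold: once the unique lexicographic minimum is reachable it wins
lemma pvMinFold_aux (f : Int → Int) (m : Int) :
    ∀ (t : List Int) (z : Int),
      (z = m ∨ ((f m < f z ∨ (f m ≤ f z ∧ z < m)) ∧ m ∈ t)) →
      (∀ y ∈ t, f m ≤ f y ∧ (f y = f m → y ≤ m)) →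
      t.foldl (pvMinStep f) (some z) = some m := by
  intro t
  induction t with
  | nil =>
      intro z hz _
      rcases hz with h | ⟨_, h⟩
      · simp [h]
      · simp at h
  | cons y t ih =>
      intro z hz hall
      have hy := hall y (by simp)
      simp only [List.foldl_cons, pvMinStep_some]
      by_cases hb : f y < f z ∨ (f y ≤ f z ∧ z < y)
      · -- y replaces z
        simp only [hb, if_true]
        apply ih
        · by_cases hym : y = m
          · exact Or.inl hym
          · refine Or.inr ⟨?_, ?_⟩
            · rcases lt_or_eq_of_le hy.1 with h | h
              · exact Or.inl h
              · exact Or.inr ⟨by omega, lt_of_le_of_ne (hy.2 h.symm) hym⟩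
            · rcases hz with h | ⟨hzb, hmem⟩
              · -- z = m, but y beat z: contradicts minimality of m
                subst h
                exfalso
                rcases hb with h | ⟨h1, h2⟩
                · omega
                · have := hy.2 (by omega)
                  omega
              · rcases List.mem_cons.mp hmem with h | h
                · exact absurd h.symm hym
                · exact h
        · intro w hw; exact hall w (List.mem_cons_of_mem _ hw)
      · -- z stays
        simp only [hb, if_false]
        apply ih
        · rcases hz with h | ⟨hzb, hmem⟩
          · exact Or.inl h
          · rcases List.mem_cons.mp hmem with h | h
            · -- y = m did not beat z, yet m beats z: contradiction
              subst h
              exfalso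
              rcases hzb with h1 | ⟨h1, h2⟩
              · exact hb (Or.inl h1)
              · exact hb (Or.inr ⟨h1, h2⟩)
            · exact Or.inr ⟨hzb, h⟩
        · intro w hw; exact hall w (List.mem_cons_of_mem _ hw)

lemma pvMin2?_eq_some (xs : List Int) (f : Int → Int) (m : Int) (hm : m ∈ xs)
    (hmin : ∀ y ∈ xs, f m ≤ f y ∧ (f y = f m → y ≤ m)) :
    PySem.List.min2? xs f (fun k => -k) = some m := by
  rw [pvMin2?_eq_foldl]
  cases xs with
  | nil => simp at hm
  | cons x t =>
      simp only [List.foldl_cons]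
      have hstep : pvMinStep f none x = some x := rfl
      rw [hstep]
      apply pvMinFold_aux
      · by_cases hxm : x = m
        · exact Or.inl hxm
        · have hx := hmin x (by simp)
          refine Or.inr ⟨?_, ?_⟩
          · rcases lt_or_eq_of_le hx.1 with h | h
            · exact Or.inl h
            · exact Or.inr ⟨by omega, lt_of_le_of_ne (hx.2 h.symm) hxm⟩
          · rcases List.mem_cons.mp hm with h | h
            · exact absurd h.symm hxm
            · exact h
      · intro w hw; exact hmin w (List.mem_cons_of_mem _ hw)

-- proof-side names for the two sub-computations of A's find_near (definitionally the port's code)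
def pvCandidates (L : List Int) (i : Nat) : List Int :=
  (if i < L.length then [L.getD i 0] else []) ++ (if 0 < i then [L.getD (i - 1) 0] else [])

def pvBestFold (cs : List Int) (ms : Int) : Option Int :=
  (cs.foldl
      (fun (st : Option Int × Int) k =>
        let d := |k - ms|
        if d ≤ (500:Int) ∧ d < st.2 then (some k, d) else st)
      (none, (500:Int) + 1)).1

-- the central fact: A's two-candidate scan around bisect_left over the sorted keys picks
-- exactly B's lexicographic (|k-ms|, -k) minimum over the in-tolerance keys
lemma pvKey_core (L K : List Int) (ms : Int) (hperm : L.Perm K)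
    (hpair : L.Pairwise (fun a b => a ≤ b)) :
    pvBestFold (pvCandidates L (PySem.List.bisectLeft L ms)) ms
      = PySem.List.min2? (K.filter (fun k => |k - ms| ≤ 500)) (fun k => |k - ms|) (fun k => -k) := by
  obtain ⟨hlen, hlt, hge⟩ := PySem.List.bisectLeft_spec L ms hpair
  set i := PySem.List.bisectLeft L ms with hi
  have hmemLK : ∀ y : Int, y ∈ K ↔ y ∈ L := fun y => (hperm.mem_iff).symm
  have hFmem : ∀ y : Int, y ∈ K.filter (fun k => |k - ms| ≤ 500) ↔ (y ∈ L ∧ |y - ms| ≤ 500) := by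
    intro y
    rw [List.mem_filter, hmemLK y]
    simp
  -- bounds from sortedness
  have hup : ∀ y ∈ L, ms ≤ y → i < L.length ∧ L.getD i 0 ≤ y := by
    intro y hy hmy
    obtain ⟨j, hj, rfl⟩ := List.mem_iff_getElem.mp hy
    have hij : i ≤ j := by
      by_contra h
      exact absurd (hlt j hj (by omega)) (by omega)
    refine ⟨by omega, ?_⟩
    rw [List.getD_eq_getElem L 0 (by omega)]
    rcases Nat.lt_or_ge i j with h | h
    · exact List.pairwise_iff_getElem.mp hpair i j (by omega) hj h
    · have : i = j := by omega
      simp [this]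
  have hlo : ∀ y ∈ L, y < ms → 0 < i ∧ y ≤ L.getD (i - 1) 0 := by
    intro y hy hmy
    obtain ⟨j, hj, rfl⟩ := List.mem_iff_getElem.mp hy
    have hij : j < i := by
      by_contra h
      exact absurd (hge j hj (by omega)) (by omega)
    refine ⟨by omega, ?_⟩
    rw [List.getD_eq_getElem L 0 (by omega)]
    rcases Nat.lt_or_ge j (i - 1) with h | h
    · exact List.pairwise_iff_getElem.mp hpair j (i - 1) hj (by omega) h
    · have : j = i - 1 := by omega
      simp [this]
  by_cases hU : i < L.length
  · have hc1ge : ms ≤ L.getD i 0 := by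
      rw [List.getD_eq_getElem L 0 hU]; exact hge i hU le_rfl
    have hc1mem : L.getD i 0 ∈ L := by
      rw [List.getD_eq_getElem L 0 hU]; exact List.getElem_mem hU
    have habs1 : |L.getD i 0 - ms| = L.getD i 0 - ms := abs_of_nonneg (by omega)
    by_cases hLo : 0 < i
    · have hi1 : i - 1 < L.length := by omega
      have hc2lt : L.getD (i - 1) 0 < ms := by
        rw [List.getD_eq_getElem L 0 hi1]; exact hlt (i - 1) hi1 (by omega)
      have hc2mem : L.getD (i - 1) 0 ∈ L := by
        rw [List.getD_eq_getElem L 0 hi1]; exact List.getElem_mem hi1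
      have habs2 : |L.getD (i - 1) 0 - ms| = ms - L.getD (i - 1) 0 := by
        rw [abs_of_nonpos (by omega)]; ring
      simp only [pvCandidates, hU, hLo, if_true, List.singleton_append]
      by_cases h1 : |L.getD i 0 - ms| ≤ 500
      · by_cases h2 : |L.getD (i - 1) 0 - ms| ≤ 500 ∧ |L.getD (i - 1) 0 - ms| < |L.getD i 0 - ms|
        · have hfold : pvBestFold [L.getD i 0, L.getD (i - 1) 0] ms = some (L.getD (i - 1) 0) := by
            simp only [pvBestFold, List.foldl_cons, List.foldl_nil]
            split_ifs <;> (try dsimp only at *)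
            all_goals first | rfl | (exfalso; omega)
          rw [hfold]
          symm
          apply pvMin2?_eq_some
          · exact (hFmem _).mpr ⟨hc2mem, h2.1⟩
          · intro y hy
            obtain ⟨hyL, hyd⟩ := (hFmem y).mp hy
            by_cases hyms : ms ≤ y
            · obtain ⟨_, hle⟩ := hup y hyL hyms
              have hdy : |y - ms| = y - ms := abs_of_nonneg (by omega)
              omega
            · obtain ⟨_, hle⟩ := hlo y hyL (by omega)
              have hdy : |y - ms| = ms - y := by rw [abs_of_nonpos (by omega)]; ring
              omega
        · have hfold : pvBestFold [L.getD i 0, L.getD (i - 1) 0] ms = some (L.getD i 0) := by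
            simp only [pvBestFold, List.foldl_cons, List.foldl_nil]
            split_ifs <;> (try dsimp only at *)
            all_goals first | rfl | (exfalso; omega)
          rw [hfold]
          symm
          apply pvMin2?_eq_some
          · exact (hFmem _).mpr ⟨hc1mem, h1⟩
          · intro y hy
            obtain ⟨hyL, hyd⟩ := (hFmem y).mp hy
            by_cases hyms : ms ≤ y
            · obtain ⟨_, hle⟩ := hup y hyL hyms
              have hdy : |y - ms| = y - ms := abs_of_nonneg (by omega)
              omega
            · obtain ⟨_, hle⟩ := hlo y hyL (by omega)
              have hdy : |y - ms| = ms - y := by rw [abs_of_nonpos (by omega)]; ring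
              rw [not_and_or] at h2
              omega
      · by_cases h2 : |L.getD (i - 1) 0 - ms| ≤ 500
        · have hfold : pvBestFold [L.getD i 0, L.getD (i - 1) 0] ms = some (L.getD (i - 1) 0) := by
            simp only [pvBestFold, List.foldl_cons, List.foldl_nil]
            split_ifs <;> (try dsimp only at *)
            all_goals first | rfl | (exfalso; omega)
          rw [hfold]
          symm
          apply pvMin2?_eq_some
          · exact (hFmem _).mpr ⟨hc2mem, h2⟩
          · intro y hy
            obtain ⟨hyL, hyd⟩ := (hFmem y).mp hy
            by_cases hyms : ms ≤ y
            · obtain ⟨_, hle⟩ := hup y hyL hyms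
              have hdy : |y - ms| = y - ms := abs_of_nonneg (by omega)
              omega
            · obtain ⟨_, hle⟩ := hlo y hyL (by omega)
              have hdy : |y - ms| = ms - y := by rw [abs_of_nonpos (by omega)]; ring
              omega
        · have hfold : pvBestFold [L.getD i 0, L.getD (i - 1) 0] ms = none := by
            simp only [pvBestFold, List.foldl_cons, List.foldl_nil]
            split_ifs <;> (try dsimp only at *)
            all_goals first | rfl | (exfalso; omega)
          rw [hfold]
          symm
          rw [show (K.filter (fun k => |k - ms| ≤ 500)) = [] from ?_]
          · rfl
          · rw [List.filter_eq_nil_iff]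
            intro y hyK
            have hyL := (hmemLK y).mp hyK
            simp only [decide_eq_true_eq, not_le]
            by_cases hyms : ms ≤ y
            · obtain ⟨_, hle⟩ := hup y hyL hyms
              have hdy : |y - ms| = y - ms := abs_of_nonneg (by omega)
              omega
            · obtain ⟨_, hle⟩ := hlo y hyL (by omega)
              have hdy : |y - ms| = ms - y := by rw [abs_of_nonpos (by omega)]; ring
              omega
    · -- i = 0: only the upper candidate exists
      simp only [pvCandidates, hU, hLo, if_true, if_false, List.append_nil]
      by_cases h1 : |L.getD i 0 - ms| ≤ 500
      · have hfold : pvBestFold [L.getD i 0] ms = some (L.getD i 0) := by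
          simp only [pvBestFold, List.foldl_cons, List.foldl_nil]
          split_ifs <;> (try dsimp only at *)
          all_goals first | rfl | (exfalso; omega)
        rw [hfold]
        symm
        apply pvMin2?_eq_some
        · exact (hFmem _).mpr ⟨hc1mem, h1⟩
        · intro y hy
          obtain ⟨hyL, hyd⟩ := (hFmem y).mp hy
          by_cases hyms : ms ≤ y
          · obtain ⟨_, hle⟩ := hup y hyL hyms
            have hdy : |y - ms| = y - ms := abs_of_nonneg (by omega)
            omega
          · exact absurd (hlo y hyL (by omega)).1 (by omega)
      · have hfold : pvBestFold [L.getD i 0] ms = none := by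
          simp only [pvBestFold, List.foldl_cons, List.foldl_nil]
          split_ifs <;> (try dsimp only at *)
          all_goals first | rfl | (exfalso; omega)
        rw [hfold]
        symm
        rw [show (K.filter (fun k => |k - ms| ≤ 500)) = [] from ?_]
        · rfl
        · rw [List.filter_eq_nil_iff]
          intro y hyK
          have hyL := (hmemLK y).mp hyK
          simp only [decide_eq_true_eq, not_le]
          by_cases hyms : ms ≤ y
          · obtain ⟨_, hle⟩ := hup y hyL hyms
            have hdy : |y - ms| = y - ms := abs_of_nonneg (by omega)
            omega
          · exact absurd (hlo y hyL (by omega)).1 (by omega)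
  · by_cases hLo : 0 < i
    · have hi1 : i - 1 < L.length := by omega
      have hc2lt : L.getD (i - 1) 0 < ms := by
        rw [List.getD_eq_getElem L 0 hi1]; exact hlt (i - 1) hi1 (by omega)
      have hc2mem : L.getD (i - 1) 0 ∈ L := by
        rw [List.getD_eq_getElem L 0 hi1]; exact List.getElem_mem hi1
      have habs2 : |L.getD (i - 1) 0 - ms| = ms - L.getD (i - 1) 0 := by
        rw [abs_of_nonpos (by omega)]; ring
      simp only [pvCandidates, hU, hLo, if_true, if_false, List.nil_append]
      by_cases h2 : |L.getD (i - 1) 0 - ms| ≤ 500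
      · have hfold : pvBestFold [L.getD (i - 1) 0] ms = some (L.getD (i - 1) 0) := by
          simp only [pvBestFold, List.foldl_cons, List.foldl_nil]
          split_ifs <;> (try dsimp only at *)
          all_goals first | rfl | (exfalso; omega)
        rw [hfold]
        symm
        apply pvMin2?_eq_some
        · exact (hFmem _).mpr ⟨hc2mem, h2⟩
        · intro y hy
          obtain ⟨hyL, hyd⟩ := (hFmem y).mp hy
          by_cases hyms : ms ≤ y
          · exact absurd (hup y hyL hyms).1 hU
          · obtain ⟨_, hle⟩ := hlo y hyL (by omega)
            have hdy : |y - ms| = ms - y := by rw [abs_of_nonpos (by omega)]; ring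
            omega
      · have hfold : pvBestFold [L.getD (i - 1) 0] ms = none := by
          simp only [pvBestFold, List.foldl_cons, List.foldl_nil]
          split_ifs <;> (try dsimp only at *)
          all_goals first | rfl | (exfalso; omega)
        rw [hfold]
        symm
        rw [show (K.filter (fun k => |k - ms| ≤ 500)) = [] from ?_]
        · rfl
        · rw [List.filter_eq_nil_iff]
          intro y hyK
          have hyL := (hmemLK y).mp hyK
          simp only [decide_eq_true_eq, not_le]
          by_cases hyms : ms ≤ y
          · exact absurd (hup y hyL hyms).1 hU
          · obtain ⟨_, hle⟩ := hlo y hyL (by omega)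
            have hdy : |y - ms| = ms - y := by rw [abs_of_nonpos (by omega)]; ring
            omega
    · -- no candidates: L (hence K) is empty
      have hL : L = [] := by
        cases hLcase : L with
        | nil => rfl
        | cons x t =>
            exfalso
            rcases lt_or_ge x ms with h | h
            · exact hLo (hlo x (by rw [hLcase]; simp) h).1
            · exact hU (hup x (by rw [hLcase]; simp) h).1
      have hK : K = [] := (hL ▸ hperm).symm.eq_nil
      have hc : pvCandidates L i = [] := by simp [pvCandidates, hU, hLo]
      rw [hc, hK]
      rfl

-- the two loop bodies agree on every timestamp
lemma pvLine_eq (bd td : PySem.Dict Int String) (acc : List String) (ts : Int) :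
    (let tag := ts_to_tag ts
     let base_text := bd.getD ts ""
     let trans_text := if td.items = [] then none else
       (let tol : Int := 500
        let trans_keys := PySem.List.sorted td.keys (fun k => k) false
        let i := PySem.List.bisectLeft trans_keys ts
        let candidates : List Int :=
          (if i < trans_keys.length then [trans_keys.getD i 0] else []) ++
          (if 0 < i then [trans_keys.getD (i - 1) 0] else [])
        let st := candidates.foldl
          (fun (st : Option Int × Int) k =>
            let d := |k - ts|
            if d ≤ tol ∧ d < st.2 then (some k, d) else st)
          (none, tol + 1)
        match st.1 with
        | some b => td.get? b
        | none => none)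
     match trans_text with
     | some t => if t ≠ "" then acc ++ [tag ++ base_text ++ " / " ++ t]
                 else acc ++ [tag ++ base_text]
     | none => acc ++ [tag ++ base_text])
    = (let near := td.keys.filter (fun k => |k - ts| ≤ 500)
       let trans_text : Option String :=
         match PySem.List.min2? near (fun k => |k - ts|) (fun k => -k) with
         | some b => td.get? b
         | none => none
       let line := ts_to_tag ts ++ bd.getD ts ""
       acc ++ [match trans_text with
               | some t => if t ≠ "" then line ++ " / " ++ t else line
               | none => line]) := by
  have hkey := pvKey_core (PySem.List.sorted td.keys (fun k => k) false) td.keys ts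
    (PySem.List.sorted_perm td.keys (fun k => k) false)
    (PySem.List.sorted_pairwise td.keys (fun k => k))
  simp only [pvBestFold, pvCandidates] at hkey
  by_cases ht : td.items = []
  · have hkeys : td.keys = [] := by simp [PySem.Dict.keys, ht]
    simp only [ht, if_pos, hkeys]
    rfl
  · simp only [if_neg ht]
    rw [hkey]
    cases PySem.List.min2? (td.keys.filter (fun k => |k - ts| ≤ 500))
        (fun k => |k - ts|) (fun k => -k) with
    | none => rfl
    | some b =>
        dsimp only
        cases td.get? b with
        | none => rfl
        | some t =>
            dsimp only
            by_cases hT : t ≠ ""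
            · rw [if_pos hT, if_pos hT]
            · rw [if_neg hT, if_neg hT]

theorem merge_lrc_spec : Claim_equal_merge_lrc := by
  intro base_map trans_map _
  unfold Spec_merge_lrc merge_lrc merge_lrc_alt
  by_cases hb : (PySem.Dict.ofList base_map).items = []
  · have hkeys : (PySem.Dict.ofList base_map).keys = [] := by simp [PySem.Dict.keys, hb]
    simp only [hb, if_pos, hkeys]
    rfl
  · simp only [if_neg hb]
    exact PySem.List.foldl_congr_mem _ _ _ _
      (fun acc x _ => pvLine_eq (PySem.Dict.ofList base_map) (PySem.Dict.ofList trans_map) acc x)
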